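-- pv_equiv track=rewrite | github.com/junyeon1997/Algorithm-source-code-python | programmers/Main15.py | solution
-- ===== SOURCE A (Python) =====
-- def solution(price, money, count):
--     answer = -1
--     tmp = 0
--     for i in range(count):
--         tmp += price*(i+1)
--     if tmp > money:
--         answer = tmp-money
--     else:
--         answer = 0
--     return answer
-- ===== SOURCE B (Python) =====
-- def solution(price, money, count):
--     n = count if count > 0 else 0
--     total = price * (n * (n + 1) // 2)
--     return total - money if total > money else 0
-- ===== Notes on version B (the rewrite author's own statement) =====
-- stated objective: faster
-- what changed: Replaces the O(count) accumulation loop with the arithmetic-series closed form price*count*(count+1)/2.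
import Mathlib
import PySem

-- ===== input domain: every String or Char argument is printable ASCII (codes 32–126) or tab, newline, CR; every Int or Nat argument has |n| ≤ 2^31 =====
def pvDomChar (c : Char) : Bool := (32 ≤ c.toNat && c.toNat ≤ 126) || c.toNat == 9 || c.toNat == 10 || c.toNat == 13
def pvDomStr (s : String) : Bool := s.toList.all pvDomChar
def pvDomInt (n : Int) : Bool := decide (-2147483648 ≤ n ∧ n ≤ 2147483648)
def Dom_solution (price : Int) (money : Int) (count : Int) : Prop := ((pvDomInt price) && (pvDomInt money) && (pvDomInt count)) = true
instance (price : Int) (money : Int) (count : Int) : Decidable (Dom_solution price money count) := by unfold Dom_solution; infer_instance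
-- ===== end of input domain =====

-- B replaces A's O(count) accumulation loop by the arithmetic-series closed form (O(1)); return values agree everywhere.

-- ===== PORT A =====
def solution (price : Int) (money : Int) (count : Int) : Int :=
  let tmp := (PySem.List.pyRange 0 count 1).foldl (fun tmp i => tmp + price * (i + 1)) 0
  if tmp > money then tmp - money else 0

-- ===== PORT B =====
def solution_alt (price : Int) (money : Int) (count : Int) : Int :=
  let n := if count > 0 then count else 0
  let total := price * PySem.Int.floordiv (n * (n + 1)) 2
  if total > money then total - money else 0

-- ===== PRECONDITION & SPEC =====
def Spec_solution (price : Int) (money : Int) (count : Int) (out : Int) : Prop := out = solution_alt price money count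
instance (price : Int) (money : Int) (count : Int) (out : Int) : Decidable (Spec_solution price money count out) := by unfold Spec_solution; infer_instance

-- ===== CLAIM (what is proved, stated in full; the proofs are below) =====
def Claim_equal_solution : Prop := ∀ (price : Int) (money : Int) (count : Int), Dom_solution price money count → Spec_solution price money count (solution price money count)

-- ===== LEMMAS AND PROOFS =====

-- A's loop sum in closed form, for nonnegative count given as a Nat cast.
lemma loop_sum_closed (price : Int) (n : Nat) :
    (PySem.List.pyRange 0 (n : Int) 1).foldl (fun tmp i => tmp + price * (i + 1)) 0
      = price * ((n : Int) * ((n : Int) + 1) / 2) := by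
  induction n with
  | zero => simp [PySem.List.pyRange_one_eq_nil]
  | succ m ih =>
    have h : (((m + 1 : Nat) : Int)) = ((m : Int)) + 1 := by push_cast; ring
    rw [h, PySem.List.pyRange_one_succ_right (by positivity), List.foldl_append, ih]
    simp only [List.foldl_cons, List.foldl_nil]
    obtain ⟨k, hk⟩ : (2 : Int) ∣ (m : Int) * ((m : Int) + 1) :=
      (Int.even_mul_succ_self (m : Int)).two_dvd
    have hk2 : ((m : Int) + 1) * (((m : Int) + 1) + 1) = 2 * (k + ((m : Int) + 1)) := by
      nlinarith [hk]
    rw [hk, hk2, Int.mul_ediv_cancel_left _ (by norm_num), Int.mul_ediv_cancel_left _ (by norm_num)]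
    ring

theorem solution_eq_alt (price money count : Int) :
    solution price money count = solution_alt price money count := by
  unfold solution solution_alt
  by_cases hc : count > 0
  · have hn : count = ((count.toNat : Nat) : Int) := by omega
    simp only [if_pos hc]
    rw [hn, loop_sum_closed price count.toNat,
        PySem.Int.floordiv_eq_ediv_of_pos (by norm_num)]
  · simp only [if_neg hc]
    rw [PySem.List.pyRange_one_eq_nil (by omega)]
    norm_num [PySem.Int.floordiv]

-- ===== VERDICT (by name: the statement is the Claim_ definition above) =====
theorem solution_spec : Claim_equal_solution := by
  intro price money count _
  exact solution_eq_alt price money count
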